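-- pv_equiv track=rewrite | github.com/falense/Master-thesis | Python EA/ea/genotypes/P1CartCoordGeno.py | unserialize_receiver_set
-- ===== SOURCE A (Python) =====
-- def unserialize_receiver_set(serialized_receiver_set):
--     receiver_set = []
--     index = 0
--     while(index+2 <= len(serialized_receiver_set)):
--         t = (serialized_receiver_set[index+0],serialized_receiver_set[index+1])#serialized_receiver_set[index+2])
--         receiver_set.append(t)
--         index = index + 2
--         #print t,
--     #print
--     return receiver_set
-- ===== SOURCE B (Python) =====
-- def unserialize_receiver_set(serialized_receiver_set):
--     return list(zip(serialized_receiver_set[0::2], serialized_receiver_set[1::2]))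
-- ===== Notes on version B (the rewrite author's own statement) =====
-- stated objective: idiomatic
-- what changed: Replaced the index-stepping while loop that appends pairs one at a time with zipping the even-index and odd-index stride-2 slices elementwise (zip truncates, matching the loop's n//2 pairs); slicing+zip run in C instead of an interpreted per-pair loop.
import Mathlib
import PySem

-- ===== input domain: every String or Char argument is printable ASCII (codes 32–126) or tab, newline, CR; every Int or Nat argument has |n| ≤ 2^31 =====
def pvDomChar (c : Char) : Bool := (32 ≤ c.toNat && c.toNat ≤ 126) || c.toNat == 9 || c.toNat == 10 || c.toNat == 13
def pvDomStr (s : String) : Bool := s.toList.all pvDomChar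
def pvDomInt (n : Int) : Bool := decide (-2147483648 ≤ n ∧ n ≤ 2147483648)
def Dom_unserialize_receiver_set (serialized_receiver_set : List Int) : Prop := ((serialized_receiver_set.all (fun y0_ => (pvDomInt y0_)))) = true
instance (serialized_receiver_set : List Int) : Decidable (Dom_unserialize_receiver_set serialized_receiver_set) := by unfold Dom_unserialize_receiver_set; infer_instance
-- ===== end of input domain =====

-- B replaces A's index-stepping while loop with zipping the even- and odd-index stride-2 slices (idiomatic; same O(n) cost).


-- ===== PORT A =====
-- the while loop: index starts at 0 and increases by 2, so it is a Nat; the guard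
-- index+2 ≤ len proves both accesses in range (Python would never raise here).
def unserializeLoopA (s : List Int) (acc : List (Int × Int)) (index : Nat) :
    List (Int × Int) :=
  if h : index + 2 ≤ s.length then
    unserializeLoopA s (acc ++ [(s[index], s[index + 1])]) (index + 2)
  else acc
termination_by s.length - index

def unserialize_receiver_set (serialized_receiver_set : List Int) : List (Int × Int) :=
  unserializeLoopA serialized_receiver_set [] 0

-- ===== PORT B =====
-- zip(s[0::2], s[1::2]); slice? with step 2 never fails (step ≠ 0), so getD [] is exact.
def unserialize_receiver_set_alt (serialized_receiver_set : List Int) : List (Int × Int) :=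
  List.zip ((PySem.List.slice? serialized_receiver_set (some 0) none 2).getD [])
           ((PySem.List.slice? serialized_receiver_set (some 1) none 2).getD [])

-- ===== PRECONDITION & SPEC =====
def Spec_unserialize_receiver_set (serialized_receiver_set : List Int) (out : List (Int × Int)) : Prop := out = unserialize_receiver_set_alt serialized_receiver_set
instance (serialized_receiver_set : List Int) (out : List (Int × Int)) : Decidable (Spec_unserialize_receiver_set serialized_receiver_set out) := by unfold Spec_unserialize_receiver_set; infer_instance

-- ===== CLAIM (what is proved, stated in full; the proofs are below) =====
def Claim_equal_unserialize_receiver_set : Prop := ∀ (serialized_receiver_set : List Int), Dom_unserialize_receiver_set serialized_receiver_set → Spec_unserialize_receiver_set serialized_receiver_set (unserialize_receiver_set serialized_receiver_set)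

-- ===== LEMMAS AND PROOFS =====

theorem filterMap_eq_map_of_forall {α β : Type} (f : α → Option β) (g : α → β)
    (l : List α) (h : ∀ x ∈ l, f x = some (g x)) : l.filterMap f = l.map g := by
  induction l with
  | nil => rfl
  | cons a t ih =>
    simp [h a (by simp), ih (fun x hx => h x (by simp [hx]))]

-- stride-2 slice starting at a ∈ ℕ, written as a map over a range of indices
theorem slice2_eq_map (s : List Int) (a : Nat) :
    (PySem.List.slice? s (some (a : Int)) none 2).getD []
      = (List.range ((s.length - a + 1) / 2)).map (fun k => s.getD (a + 2 * k) 0) := by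
  have h2 : (2 : Int) ≠ 0 := by norm_num
  simp only [PySem.List.slice?, PySem.List.sliceIndices, if_neg h2]
  norm_num
  set n := s.length with hn
  have ha0 : ¬ ((a : Int) < 0) := by omega
  simp only [if_neg ha0]
  by_cases hlt : a < n
  · have hm : min (a : Int) (n : Int) = (a : Int) := min_eq_left (by omega)
    have hif : ((a : Int)) < (n : Int) := by exact_mod_cast hlt
    have hc : (((n : Int) - (a : Int) + 2 - 1) / 2).toNat = (n - a + 1) / 2 := by omega
    rw [hm, if_pos hif, hc]
    apply filterMap_eq_map_of_forall
    intro k hk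
    rw [List.mem_range] at hk
    have hidx : a + 2 * k < n := by omega
    have htn : ((a : Int) + 2 * (k : Int)).toNat = a + 2 * k := by omega
    rw [htn, List.getElem?_eq_getElem (by omega)]
    simp
  · have hm : min (a : Int) (n : Int) = (n : Int) := min_eq_right (by omega)
    have hc : (n - a + 1) / 2 = 0 := by omega
    rw [hm, if_neg (lt_irrefl _), hc]
    simp

-- A's loop, as a map over a range of pair indices
theorem loopA_eq_map (s : List Int) :
    ∀ (m index : Nat) (acc : List (Int × Int)), s.length - index ≤ m →
      unserializeLoopA s acc index
        = acc ++ (List.range ((s.length - index) / 2)).map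
            (fun k => (s.getD (index + 2 * k) 0, s.getD (index + 2 * k + 1) 0)) := by
  intro m
  induction m with
  | zero =>
    intro index acc hm
    rw [unserializeLoopA]
    have hng : ¬ (index + 2 ≤ s.length) := by omega
    rw [dif_neg hng]
    have : (s.length - index) / 2 = 0 := by omega
    simp [this]
  | succ m ih =>
    intro index acc hm
    rw [unserializeLoopA]
    by_cases hg : index + 2 ≤ s.length
    · rw [dif_pos hg, ih (index + 2) _ (by omega)]
      have hsplit : (s.length - index) / 2 = (s.length - (index + 2)) / 2 + 1 := by omega
      rw [hsplit, List.range_succ_eq_map, List.map_cons, List.map_map]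
      have h0 : s.getD (index + 2 * 0) 0 = s[index] :=
        List.getD_eq_getElem s 0 (by omega)
      have h1 : s.getD (index + 2 * 0 + 1) 0 = s[index + 1] :=
        List.getD_eq_getElem s 0 (by omega)
      have hfun : ((fun k => (s.getD (index + 2 * k) 0, s.getD (index + 2 * k + 1) 0)) ∘
          (fun n => n + 1))
          = (fun k => (s.getD (index + 2 + 2 * k) 0, s.getD (index + 2 + 2 * k + 1) 0)) := by
        funext k
        simp only [Function.comp]
        have e1 : index + 2 * (k + 1) = index + 2 + 2 * k := by omega
        have e2 : index + 2 * (k + 1) + 1 = index + 2 + 2 * k + 1 := by omega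
        rw [e1]
      rw [hfun, h0, h1]
      simp
    · rw [dif_neg hg]
      have : (s.length - index) / 2 = 0 := by omega
      simp [this]

theorem unserialize_receiver_set_spec' (s : List Int) :
    unserialize_receiver_set s = unserialize_receiver_set_alt s := by
  set n := s.length with hn
  rw [unserialize_receiver_set,
      loopA_eq_map s n 0 [] (by omega),
      unserialize_receiver_set_alt]
  rw [show ((0 : Int)) = ((0 : Nat) : Int) by norm_num,
      show ((1 : Int)) = ((1 : Nat) : Int) by norm_num,
      slice2_eq_map s 0, slice2_eq_map s 1]
  have hc1 : (n - 1 + 1) / 2 = n / 2 := by omega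
  have hc0 : (n - 0 + 1) / 2 = n / 2 + ((n + 1) / 2 - n / 2) := by omega
  rw [hc1, hc0, List.range_add, List.map_append, List.zip_eq_zipWith,
      ← List.append_nil ((List.range (n / 2)).map (fun k => s.getD (1 + 2 * k) 0))]
  rw [List.zipWith_append (by simp), List.zipWith_nil_right, List.append_nil,
      ← List.zip_eq_zipWith, List.zip_map']
  have : n - 0 = n := by omega
  rw [this]
  apply List.map_congr_left
  intro k _
  have e0 : 0 + 2 * k = 2 * k := by omega
  have e1 : 1 + 2 * k = 2 * k + 1 := by omega
  rw [e0, e1]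
  norm_num

-- ===== VERDICT (by name: the statement is the Claim_ definition above) =====
theorem unserialize_receiver_set_spec : Claim_equal_unserialize_receiver_set := by
  intro s _
  exact unserialize_receiver_set_spec' s
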